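-- pv_equiv track=rewrite | github.com/RvMerle/advent_of_code | 2025/day04/code.py | part1
-- ===== SOURCE A (Python) =====
-- def part1(diagram: list[str]) -> tuple[list[str], int]:
--     res = []
--     count = 0
--     for i in range(len(diagram)):
--         row = ""
--         for j in range(len(diagram[0])):
--             if diagram[i][j] == "@" and (
--                 sum(
--                     int(diagram[k][l] == "@")
--                     for k in range(max(i - 1, 0), min(i + 2, len(diagram)))
--                     for l in range(max(j - 1, 0), min(j + 2, len(diagram[0])))
--                 )
--                 <= 4
--             ):
--                 row += "."
--                 count += 1
--             else:
--                 row += diagram[i][j]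
--         res.append(row)
--
--     return res, count
-- ===== SOURCE B (Python) =====
-- def part1(diagram: list[str]) -> tuple[list[str], int]:
--     # 2D prefix sums of '@' cells; each cell's 3x3 window count is then
--     # an inclusion-exclusion lookup instead of a 9-cell rescan.
--     if not diagram:
--         return [], 0
--     n = len(diagram)
--     m = len(diagram[0])
--     # P[r][c] = number of '@' in rows < r, columns < c (grid truncated to width m)
--     P = [[0] * (m + 1)]
--     for row in diagram:
--         prev = P[-1]
--         cur = [0]
--         s = 0
--         for j in range(m):
--             if row[j] == "@":
--                 s += 1
--             cur.append(prev[j + 1] + s)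
--         P.append(cur)
--     res = []
--     count = 0
--     for i in range(n):
--         row = diagram[i]
--         out = []
--         for j in range(m):
--             ch = row[j]
--             if ch == "@":
--                 r0 = max(i - 1, 0); r1 = min(i + 2, n)
--                 c0 = max(j - 1, 0); c1 = min(j + 2, m)
--                 if P[r1][c1] - P[r0][c1] - P[r1][c0] + P[r0][c0] <= 4:
--                     out.append(".")
--                     count += 1
--                 else:
--                     out.append(ch)
--             else:
--                 out.append(ch)
--         res.append("".join(out))
--     return res, count
-- ===== Notes on version B (the rewrite author's own statement) =====
-- stated objective: alternative
-- what changed: Replaces A's per-'@' 3x3 neighborhood rescan (a nested generator sum per cell) with a 2D prefix-sum table built once, so each cell's window count becomes a 4-lookup inclusion-exclusion expression.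
import Mathlib
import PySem

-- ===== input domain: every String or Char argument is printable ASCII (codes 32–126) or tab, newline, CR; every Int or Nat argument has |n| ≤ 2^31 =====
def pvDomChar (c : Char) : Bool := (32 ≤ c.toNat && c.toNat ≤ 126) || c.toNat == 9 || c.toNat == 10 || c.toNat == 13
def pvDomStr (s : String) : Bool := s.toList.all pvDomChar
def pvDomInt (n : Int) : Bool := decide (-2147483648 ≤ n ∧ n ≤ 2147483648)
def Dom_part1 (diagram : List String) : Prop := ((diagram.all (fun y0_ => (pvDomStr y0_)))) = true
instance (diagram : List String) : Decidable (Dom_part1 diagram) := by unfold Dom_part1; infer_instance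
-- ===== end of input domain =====

-- B replaces A's per-cell 3x3 rescan with a 2D prefix-sum table (inclusion-exclusion window lookup): an alternative algorithm of the same cost.


-- ===== PORT A =====
-- diagram[k][l]: total form of the double index; exact wherever Pre_part1 keeps the indices in range
def pvCell (diagram : List String) (k l : Int) : Char :=
  PySem.List.pyGetD (PySem.List.pyGetD diagram k "").toList l ' '

def part1 (diagram : List String) : List String × Int :=
  let n : Int := PySem.List.len diagram
  let m : Int := PySem.List.len (PySem.List.pyGetD diagram 0 "").toList
  (PySem.List.pyRange 0 n 1).foldl (fun (acc : List String × Int) i =>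
    let inner := (PySem.List.pyRange 0 m 1).foldl (fun (st : List Char × Int) j =>
      if pvCell diagram i j = '@' ∧
          ((PySem.List.pyRange (max (i-1) 0) (min (i+2) n) 1).map (fun k =>
            ((PySem.List.pyRange (max (j-1) 0) (min (j+2) m) 1).map (fun l =>
              if pvCell diagram k l = '@' then (1:Int) else 0)).sum)).sum ≤ 4
      then (st.1 ++ ['.'], st.2 + 1)
      else (st.1 ++ [pvCell diagram i j], st.2)) ([], acc.2)
    (acc.1 ++ [String.ofList inner.1], inner.2)) ([], 0)

-- ===== PORT B =====
def part1_alt (diagram : List String) : List String × Int :=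
  if diagram = [] then ([], 0) else
  let n : Int := PySem.List.len diagram
  let m : Int := PySem.List.len (PySem.List.pyGetD diagram 0 "").toList
  let P : List (List Int) := diagram.foldl (fun (P : List (List Int)) row =>
    let prev := PySem.List.pyGetD P (-1) []
    let cur := (PySem.List.pyRange 0 m 1).foldl (fun (st : List Int × Int) j =>
      let s := if PySem.List.pyGetD row.toList j ' ' = '@' then st.2 + 1 else st.2
      (st.1 ++ [PySem.List.pyGetD prev (j+1) 0 + s], s)) ([0], 0)
    P ++ [cur.1]) [List.replicate (m+1).toNat 0]
  (PySem.List.pyRange 0 n 1).foldl (fun (acc : List String × Int) i =>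
    let row := PySem.List.pyGetD diagram i ""
    let inner := (PySem.List.pyRange 0 m 1).foldl (fun (st : List Char × Int) j =>
      let ch := PySem.List.pyGetD row.toList j ' '
      if ch = '@' then
        if PySem.List.pyGetD (PySem.List.pyGetD P (min (i+2) n) []) (min (j+2) m) 0
           - PySem.List.pyGetD (PySem.List.pyGetD P (max (i-1) 0) []) (min (j+2) m) 0
           - PySem.List.pyGetD (PySem.List.pyGetD P (min (i+2) n) []) (max (j-1) 0) 0
           + PySem.List.pyGetD (PySem.List.pyGetD P (max (i-1) 0) []) (max (j-1) 0) 0 ≤ 4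
        then (st.1 ++ ['.'], st.2 + 1)
        else (st.1 ++ [ch], st.2)
      else (st.1 ++ [ch], st.2)) ([], acc.2)
    (acc.1 ++ [String.ofList inner.1], inner.2)) ([], 0)

-- ===== PRECONDITION & SPEC =====
-- Pre_ excludes ragged diagrams with a row shorter than the first row, on which A raises IndexError.
def Pre_part1 (diagram : List String) : Prop :=
  ∀ s ∈ diagram, (diagram.headD "").toList.length ≤ s.toList.length
instance (diagram : List String) : Decidable (Pre_part1 diagram) := by unfold Pre_part1; infer_instance

def pvWitness_part1 : List String := ["@@.", "@@@", ".@@"]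

def Spec_part1 (diagram : List String) (out : List String × Int) : Prop := out = part1_alt diagram
instance (diagram : List String) (out : List String × Int) : Decidable (Spec_part1 diagram out) := by unfold Spec_part1; infer_instance

-- ===== CLAIM (what is proved, stated in full; the proofs are below) =====
def Claim_equal_part1 : Prop := ∀ (diagram : List String), Dom_part1 diagram → Pre_part1 diagram → Spec_part1 diagram (part1 diagram)

-- ===== LEMMAS AND PROOFS =====
-- 0/1 indicator of an '@' at (k,l); row/column prefix counts of '@' cells
def pvCnt (d : List String) (k l : Int) : Int := if pvCell d k l = '@' then 1 else 0
def pvRpRow (row : String) (c : Int) : Int :=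
  ((PySem.List.pyRange 0 c 1).map (fun l => if PySem.List.pyGetD row.toList l ' ' = '@' then (1:Int) else 0)).sum
def pvRp (d : List String) (k c : Int) : Int := pvRpRow (PySem.List.pyGetD d k "") c
def pvS (d : List String) (r c : Int) : Int := ((PySem.List.pyRange 0 r 1).map (fun k => pvRp d k c)).sum

theorem pv_sum_split (f : Int → Int) {a b : Int} (h0 : 0 ≤ a) (h : a ≤ b) :
    ((PySem.List.pyRange a b 1).map f).sum
      = ((PySem.List.pyRange 0 b 1).map f).sum - ((PySem.List.pyRange 0 a 1).map f).sum := by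
  rw [PySem.List.pyRange_one_append 0 a b h0 h, List.map_append, List.sum_append]; ring

theorem pv_sum_map_sub (l : List Int) (f g : Int → Int) :
    (l.map (fun x => f x - g x)).sum = (l.map f).sum - (l.map g).sum := by
  induction l with
  | nil => simp
  | cons x xs ih => simp [ih]; ring

theorem pvRp_eq (d : List String) (k c : Int) :
    pvRp d k c = ((PySem.List.pyRange 0 c 1).map (fun l => pvCnt d k l)).sum := rfl

theorem pv_window (d : List String) {r0 r1 c0 c1 : Int}
    (hr0 : 0 ≤ r0) (hr : r0 ≤ r1) (hc0 : 0 ≤ c0) (hc : c0 ≤ c1) :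
    ((PySem.List.pyRange r0 r1 1).map (fun k =>
        ((PySem.List.pyRange c0 c1 1).map (fun l => pvCnt d k l)).sum)).sum
      = pvS d r1 c1 - pvS d r0 c1 - pvS d r1 c0 + pvS d r0 c0 := by
  have h1 : (fun k => ((PySem.List.pyRange c0 c1 1).map (fun l => pvCnt d k l)).sum)
      = (fun k => pvRp d k c1 - pvRp d k c0) := by
    funext k; rw [pv_sum_split _ hc0 hc, pvRp_eq, pvRp_eq]
  rw [h1, pv_sum_map_sub, pv_sum_split _ hr0 hr, pv_sum_split _ hr0 hr]
  show pvS d r1 c1 - pvS d r0 c1 - (pvS d r1 c0 - pvS d r0 c0) = _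
  ring

theorem pvRpRow_succ (row : String) {c : Int} (hc : 0 ≤ c) :
    pvRpRow row (c+1) = pvRpRow row c + (if PySem.List.pyGetD row.toList c ' ' = '@' then 1 else 0) := by
  simp [pvRpRow, PySem.List.pyRange_one_succ_right hc]

theorem pvS_succ (d : List String) {r : Int} (c : Int) (hr : 0 ≤ r) :
    pvS d (r+1) c = pvS d r c + pvRp d r c := by
  simp [pvS, PySem.List.pyRange_one_succ_right hr]

theorem pvS_zero (d : List String) (r : Int) : pvS d r 0 = 0 := by
  simp [pvS, pvRp, pvRpRow, PySem.List.pyRange_one, Function.comp_def]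

theorem pv_map_shift {α : Type} (f : Int → α) (m : Int) (hm : 0 ≤ m) :
    f 0 :: (PySem.List.pyRange 0 m 1).map (fun j => f (j+1)) = (PySem.List.pyRange 0 (m+1) 1).map f := by
  rw [PySem.List.pyRange_one_cons (show (0:Int) < m+1 by omega), List.map_cons]
  congr 1
  simp only [PySem.List.pyRange_one, List.map_map, Function.comp_def]
  have h : (m + 1 - (0 + 1)).toNat = (m - 0).toNat := by omega
  rw [h]
  apply List.map_congr_left
  intro k _
  congr 1
  omega

theorem pv_buildRow (row : String) (prev : List Int) {c : Int} (hc : 0 ≤ c) :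
    (PySem.List.pyRange 0 c 1).foldl (fun (st : List Int × Int) j =>
        (st.1 ++ [PySem.List.pyGetD prev (j+1) 0 +
            (if PySem.List.pyGetD row.toList j ' ' = '@' then st.2 + 1 else st.2)],
         if PySem.List.pyGetD row.toList j ' ' = '@' then st.2 + 1 else st.2)) ([0], 0)
      = ([0] ++ (PySem.List.pyRange 0 c 1).map (fun j => PySem.List.pyGetD prev (j+1) 0 + pvRpRow row (j+1)),
         pvRpRow row c) := by
  induction c, hc using Int.le_induction with
  | base => simp [PySem.List.pyRange_one, pvRpRow]
  | succ c hc ih =>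
    rw [PySem.List.pyRange_one_succ_right hc, List.foldl_append, ih]
    simp only [List.foldl_cons, List.foldl_nil, List.map_append, List.map_cons, List.map_nil]
    rw [pvRpRow_succ row hc]
    by_cases hcell : PySem.List.pyGetD row.toList c ' ' = '@' <;>
      simp [hcell]

theorem pv_buildP_go (d : List String) (m : Int) (hm : 0 ≤ m) :
    ∀ (rows : List String) (r : Nat), rows = d.drop r → r ≤ d.length →
    rows.foldl (fun (P : List (List Int)) row =>
      P ++ [((PySem.List.pyRange 0 m 1).foldl (fun (st : List Int × Int) j =>
        (st.1 ++ [PySem.List.pyGetD (PySem.List.pyGetD P (-1) []) (j+1) 0 +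
            (if PySem.List.pyGetD row.toList j ' ' = '@' then st.2 + 1 else st.2)],
         if PySem.List.pyGetD row.toList j ' ' = '@' then st.2 + 1 else st.2)) ([0], 0)).1])
      ((PySem.List.pyRange 0 ((r:Int)+1) 1).map (fun rr => (PySem.List.pyRange 0 (m+1) 1).map (fun c => pvS d rr c)))
    = (PySem.List.pyRange 0 ((d.length:Int)+1) 1).map (fun rr => (PySem.List.pyRange 0 (m+1) 1).map (fun c => pvS d rr c)) := by
  intro rows
  induction rows with
  | nil =>
    intro r hr hle
    have h1 : d.length ≤ r := List.drop_eq_nil_iff.mp hr.symm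
    have h2 : r = d.length := le_antisymm hle h1
    subst h2
    rfl
  | cons row rest ih =>
    intro r hr hle
    have hrlt : r < d.length := by
      by_contra hcon
      have : d.drop r = [] := List.drop_eq_nil_of_le (by omega)
      rw [this] at hr
      simp at hr
    have hdec := (List.drop_eq_getElem_cons hrlt).symm.trans hr.symm
    have hrow : row = d[r] := (List.cons.injEq _ _ _ _ ▸ hdec).1.symm
    have hrest : rest = d.drop (r+1) := ((List.cons.injEq _ _ _ _ ▸ hdec).2).symm
    rw [List.foldl_cons]
    have hprev : PySem.List.pyGetD
        ((PySem.List.pyRange 0 ((r:Int)+1) 1).map (fun rr => (PySem.List.pyRange 0 (m+1) 1).map (fun c => pvS d rr c))) (-1) []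
        = (PySem.List.pyRange 0 (m+1) 1).map (fun c => pvS d (r:Int) c) := by
      rw [PySem.List.pyRange_one_succ_right (Int.natCast_nonneg r), List.map_append, List.map_cons,
        List.map_nil, PySem.List.pyGetD_neg_one_append_singleton]
    have hstep :
        ((PySem.List.pyRange 0 ((r:Int)+1) 1).map (fun rr => (PySem.List.pyRange 0 (m+1) 1).map (fun c => pvS d rr c)))
          ++ [((PySem.List.pyRange 0 m 1).foldl (fun (st : List Int × Int) j =>
            (st.1 ++ [PySem.List.pyGetD (PySem.List.pyGetD
                ((PySem.List.pyRange 0 ((r:Int)+1) 1).map (fun rr => (PySem.List.pyRange 0 (m+1) 1).map (fun c => pvS d rr c))) (-1) []) (j+1) 0 +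
                (if PySem.List.pyGetD row.toList j ' ' = '@' then st.2 + 1 else st.2)],
             if PySem.List.pyGetD row.toList j ' ' = '@' then st.2 + 1 else st.2)) ([0], 0)).1]
        = ((PySem.List.pyRange 0 (((r+1:Nat):Int)+1) 1).map (fun rr => (PySem.List.pyRange 0 (m+1) 1).map (fun c => pvS d rr c))) := by
      rw [hprev, pv_buildRow row _ hm]
      have hmap : (PySem.List.pyRange 0 m 1).map (fun j =>
            PySem.List.pyGetD ((PySem.List.pyRange 0 (m+1) 1).map (fun c => pvS d (r:Int) c)) (j+1) 0 + pvRpRow row (j+1))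
          = (PySem.List.pyRange 0 m 1).map (fun j => pvS d ((r:Int)+1) (j+1)) := by
        apply List.map_congr_left
        intro j hj
        obtain ⟨hj0, hjm⟩ := (PySem.List.mem_pyRange_one).mp hj
        rw [PySem.List.pyGetD_map_pyRange_of_nonneg _ _ _ _ (by omega) (by omega)]
        have hrp : pvRpRow row (j+1) = pvRp d (r:Int) (j+1) := by
          rw [pvRp, PySem.List.pyGetD_natCast, List.getD_eq_getElem _ _ hrlt, hrow]
        rw [hrp, (pvS_succ d (j+1) (Int.natCast_nonneg r)).symm]
      rw [hmap]
      have hshift : (0:Int) :: (PySem.List.pyRange 0 m 1).map (fun j => pvS d ((r:Int)+1) (j+1))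
          = (PySem.List.pyRange 0 (m+1) 1).map (fun c => pvS d ((r:Int)+1) c) := by
        rw [← pv_map_shift (fun c => pvS d ((r:Int)+1) c) m hm, pvS_zero]
      simp only [List.cons_append, List.nil_append]
      rw [hshift]
      have hcast : ((r+1:Nat):Int) + 1 = ((r:Int) + 1) + 1 := by push_cast; ring
      rw [hcast, PySem.List.pyRange_one_succ_right (by omega : (0:Int) ≤ (r:Int)+1), List.map_append,
        List.map_cons, List.map_nil]
    rw [hstep, ih (r+1) hrest (by omega)]

theorem pv_buildP (d : List String) (m : Int) (hm : 0 ≤ m) :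
    d.foldl (fun (P : List (List Int)) row =>
      P ++ [((PySem.List.pyRange 0 m 1).foldl (fun (st : List Int × Int) j =>
        (st.1 ++ [PySem.List.pyGetD (PySem.List.pyGetD P (-1) []) (j+1) 0 +
            (if PySem.List.pyGetD row.toList j ' ' = '@' then st.2 + 1 else st.2)],
         if PySem.List.pyGetD row.toList j ' ' = '@' then st.2 + 1 else st.2)) ([0], 0)).1])
      [List.replicate (m+1).toNat 0]
    = (PySem.List.pyRange 0 ((d.length:Int)+1) 1).map (fun rr =>
        (PySem.List.pyRange 0 (m+1) 1).map (fun c => pvS d rr c)) := by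
  have hgo := pv_buildP_go d m hm d 0 rfl (Nat.zero_le _)
  simp only [Nat.cast_zero, zero_add] at hgo
  have h01 : PySem.List.pyRange 0 1 1 = [(0:Int)] := by decide
  rw [h01, List.map_cons, List.map_nil] at hgo
  have hF0 : (PySem.List.pyRange 0 (m+1) 1).map (fun c => pvS d 0 c) = List.replicate (m+1).toNat 0 := by
    have hz : (fun c => pvS d (0:Int) c) = (fun _ : Int => (0:Int)) := by
      funext c; simp [pvS]
    rw [hz, List.map_const', PySem.List.length_pyRange_one]
    norm_num
  rw [hF0] at hgo
  exact hgo

theorem pv_lookup (d : List String) (m r c : Int)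
    (hr0 : 0 ≤ r) (hr : r ≤ (d.length:Int)) (hc0 : 0 ≤ c) (hc : c ≤ m) :
    PySem.List.pyGetD (PySem.List.pyGetD
        ((PySem.List.pyRange 0 ((d.length:Int)+1) 1).map (fun rr =>
          (PySem.List.pyRange 0 (m+1) 1).map (fun cc => pvS d rr cc))) r []) c 0
      = pvS d r c := by
  rw [PySem.List.pyGetD_map_pyRange_of_nonneg _ _ _ _ hr0 (by omega),
    PySem.List.pyGetD_map_pyRange_of_nonneg _ _ _ _ hc0 (by omega)]

-- ===== VERDICT (by name: the statement is the Claim_ definition above) =====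
theorem part1_spec : Claim_equal_part1 := by
  unfold Claim_equal_part1 Spec_part1
  intro d _ _
  by_cases hd : d = []
  · subst hd; decide
  · simp only [part1, part1_alt, if_neg hd, PySem.List.len_eq, pvCell]
    apply PySem.List.foldl_congr_mem
    intro acc i hi
    obtain ⟨hi0, hin⟩ := (PySem.List.mem_pyRange_one).mp hi
    refine congrArg (fun p : List Char × Int => (acc.1 ++ [String.ofList p.1], p.2)) ?_
    apply PySem.List.foldl_congr_mem
    intro st j hj
    obtain ⟨hj0, hjm⟩ := (PySem.List.mem_pyRange_one).mp hj
    simp only [pv_buildP d _ (Int.natCast_nonneg _)]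
    simp only [pv_lookup d ((PySem.List.pyGetD d 0 "").toList.length : Int) (min (i+2) ((d.length : Int))) (min (j+2) ((PySem.List.pyGetD d 0 "").toList.length : Int)) (by omega) (by omega) (by omega) (by omega),
      pv_lookup d ((PySem.List.pyGetD d 0 "").toList.length : Int) (max (i-1) 0) (min (j+2) ((PySem.List.pyGetD d 0 "").toList.length : Int)) (by omega) (by omega) (by omega) (by omega),
      pv_lookup d ((PySem.List.pyGetD d 0 "").toList.length : Int) (min (i+2) ((d.length : Int))) (max (j-1) 0) (by omega) (by omega) (by omega) (by omega),
      pv_lookup d ((PySem.List.pyGetD d 0 "").toList.length : Int) (max (i-1) 0) (max (j-1) 0) (by omega) (by omega) (by omega) (by omega)]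
    have hw := pv_window d (r0 := max (i-1) 0) (r1 := min (i+2) (d.length : Int))
      (c0 := max (j-1) 0) (c1 := min (j+2) ((PySem.List.pyGetD d 0 "").toList.length : Int))
      (by omega) (by omega) (by omega) (by omega)
    simp only [pvCnt, pvCell] at hw
    simp only [hw]
    split_ifs <;> first | rfl | tauto
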